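-- pv_equiv track=rewrite | github.com/Patrick-M8/tabelog-map | build_geojson.py | group_days
-- ===== SOURCE A (Python) =====
-- DAY_ORDER = ["mon", "tue", "wed", "thu", "fri", "sat", "sun"]
--
-- DAY_ABBR = {"mon": "Mon", "tue": "Tue", "wed": "Wed", "thu": "Thu", "fri": "Fri", "sat": "Sat", "sun": "Sun"}
--
-- def group_days(day_blocks):
--     if not day_blocks:
--         return ""
--     days = sorted(set(day_blocks), key=lambda d: DAY_ORDER.index(d))
--     ranges = []
--     cur = [days[0]]
--     for d in days[1:]:
--         if DAY_ORDER.index(d) == DAY_ORDER.index(cur[-1]) + 1: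
--             cur.append(d)
--         else:
--             ranges.append(cur); cur = [d]
--     ranges.append(cur)
--     parts = []
--     for r in ranges:
--         if len(r) == 1: parts.append(DAY_ABBR[r[0]])
--         else: parts.append(f"{DAY_ABBR[r[0]]}–{DAY_ABBR[r[-1]]}")
--     return ", ".join(parts)
-- ===== SOURCE B (Python) =====
-- DAY_ORDER = ["mon", "tue", "wed", "thu", "fri", "sat", "sun"]
--
-- DAY_ABBR = {"mon": "Mon", "tue": "Tue", "wed": "Wed", "thu": "Thu", "fri": "Fri", "sat": "Sat", "sun": "Sun"}
--
-- def group_days(day_blocks):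
--     present = [False] * 7
--     for d in set(day_blocks):
--         present[DAY_ORDER.index(d)] = True
--     parts = []
--     start = None
--     for i in range(8):
--         if i < 7 and present[i]:
--             if start is None:
--                 start = i
--         elif start is not None:
--             if start == i - 1:
--                 parts.append(DAY_ABBR[DAY_ORDER[start]])
--             else:
--                 parts.append(f"{DAY_ABBR[DAY_ORDER[start]]}–{DAY_ABBR[DAY_ORDER[i - 1]]}")
--             start = None
--     return ", ".join(parts)
-- ===== Notes on version B (the rewrite author's own statement) =====
-- stated objective: idiomatic
-- what changed: B replaces sorting the unique days by DAY_ORDER index and comparing adjacent indices with a 7-slot boolean presence array over the fixed day universe, scanned once left to right to close runs.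
import Mathlib
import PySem

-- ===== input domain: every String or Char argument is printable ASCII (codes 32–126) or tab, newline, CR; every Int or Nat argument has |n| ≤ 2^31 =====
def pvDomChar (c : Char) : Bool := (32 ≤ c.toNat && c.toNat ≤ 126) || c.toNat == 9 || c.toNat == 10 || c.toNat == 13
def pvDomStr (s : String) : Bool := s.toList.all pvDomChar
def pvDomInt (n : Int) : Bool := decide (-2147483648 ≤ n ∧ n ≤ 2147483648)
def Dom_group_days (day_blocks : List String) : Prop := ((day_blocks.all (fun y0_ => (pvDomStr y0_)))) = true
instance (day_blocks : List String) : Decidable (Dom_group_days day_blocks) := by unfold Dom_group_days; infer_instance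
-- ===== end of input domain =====

-- B replaces sort-and-compare-adjacent-indices with a 7-slot presence array scanned left to right (idiomatic, no sort).

-- ===== PORT A =====
def dayOrder : List String := ["mon", "tue", "wed", "thu", "fri", "sat", "sun"]

def dayAbbr : PySem.Dict String String :=
  PySem.Dict.ofList [("mon", "Mon"), ("tue", "Tue"), ("wed", "Wed"), ("thu", "Thu"), ("fri", "Fri"), ("sat", "Sat"), ("sun", "Sun")]

-- DAY_ORDER.index(d); the .getD 7 arm is unreachable under Pre_ (d ∈ DAY_ORDER)
def idxA (d : String) : Nat := (PySem.List.index? dayOrder d).getD 7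

-- DAY_ABBR[r] ; KeyError is unreachable under Pre_
def abbrA (d : String) : String := (PySem.Dict.get? dayAbbr d).getD ""

-- everything A does after `days = sorted(...)`
def groupDaysFrom (days : List String) : String :=
  match days with
  | [] => ""
  | d0 :: rest =>
    let st := rest.foldl
      (fun (st : List (List String) × List String) d =>
        if idxA d = idxA (PySem.List.pyGetD st.2 (-1) "") + 1 then (st.1, st.2 ++ [d])
        else (st.1 ++ [st.2], [d]))
      ([], [d0])
    let ranges := st.1 ++ [st.2]
    let parts := ranges.map (fun r =>
      if r.length = 1 then abbrA (PySem.List.pyGetD r 0 "")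
      else abbrA (PySem.List.pyGetD r 0 "") ++ "–" ++ abbrA (PySem.List.pyGetD r (-1) ""))
    PySem.Str.join ", " parts

def group_days (day_blocks : List String) : String :=
  if day_blocks = [] then ""
  else groupDaysFrom (PySem.List.sorted (PySem.Set.ofList day_blocks) (fun d => idxA d) false)

-- ===== PORT B =====
-- the scan over range(8) closing runs of present days
def runsFrom (present : List Bool) : String :=
  let st := (PySem.List.pyRange 0 8 1).foldl
    (fun (st : List String × Option Int) i =>
      if i < 7 ∧ PySem.List.pyGetD present i false = true then
        match st.2 with
        | none => (st.1, some i)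
        | some _ => st
      else
        match st.2 with
        | none => st
        | some start =>
          if start = i - 1 then
            (st.1 ++ [abbrA (PySem.List.pyGetD dayOrder start "")], none)
          else
            (st.1 ++ [abbrA (PySem.List.pyGetD dayOrder start "") ++ "–" ++
                      abbrA (PySem.List.pyGetD dayOrder (i - 1) "")], none))
    ([], none)
  PySem.Str.join ", " st.1

def group_days_alt (day_blocks : List String) : String :=
  let present := (PySem.Set.ofList day_blocks).foldl
    (fun (pr : List Bool) d => PySem.List.pySetD pr (idxA d) true)
    [false, false, false, false, false, false, false]
  runsFrom present

-- ===== PRECONDITION & SPEC =====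
-- Pre_ excludes exactly the inputs containing a string outside DAY_ORDER, on which A raises ValueError (DAY_ORDER.index).
def Pre_group_days (day_blocks : List String) : Prop := ∀ d ∈ day_blocks, d ∈ dayOrder
instance (day_blocks : List String) : Decidable (Pre_group_days day_blocks) := by unfold Pre_group_days; infer_instance
def pvWitness_group_days : List String := ["sun", "mon", "tue", "fri", "mon"]

def Spec_group_days (day_blocks : List String) (out : String) : Prop := out = group_days_alt day_blocks
instance (day_blocks : List String) (out : String) : Decidable (Spec_group_days day_blocks out) := by unfold Spec_group_days; infer_instance

-- ===== CLAIM (what is proved, stated in full; the proofs are below) =====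
def Claim_equal_group_days : Prop := ∀ (day_blocks : List String), Dom_group_days day_blocks → Pre_group_days day_blocks → Spec_group_days day_blocks (group_days day_blocks)

-- ===== LEMMAS AND PROOFS =====

-- the filtered day list, written as a function of the seven membership booleans
def mkList (b0 b1 b2 b3 b4 b5 b6 : Bool) : List String :=
  (if b0 then ["mon"] else []) ++ (if b1 then ["tue"] else []) ++ (if b2 then ["wed"] else []) ++
  (if b3 then ["thu"] else []) ++ (if b4 then ["fri"] else []) ++ (if b5 then ["sat"] else []) ++
  (if b6 then ["sun"] else [])

lemma filter_dayOrder (p : String → Bool) :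
    dayOrder.filter p = mkList (p "mon") (p "tue") (p "wed") (p "thu") (p "fri") (p "sat") (p "sun") := by
  simp only [dayOrder, mkList, List.filter_cons, List.filter_nil]
  cases p "mon" <;> cases p "tue" <;> cases p "wed" <;> cases p "thu" <;>
    cases p "fri" <;> cases p "sat" <;> cases p "sun" <;> rfl

-- the 128-case core: A's post-sort pipeline on the filtered list equals B's scan on the mask
lemma core (b0 b1 b2 b3 b4 b5 b6 : Bool) :
    groupDaysFrom (mkList b0 b1 b2 b3 b4 b5 b6) = runsFrom [b0, b1, b2, b3, b4, b5, b6] := by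
  cases b0 <;> cases b1 <;> cases b2 <;> cases b3 <;> cases b4 <;> cases b5 <;> cases b6 <;> rfl

-- B's presence fold computes the membership mask
lemma maskFold (l : List String) (hl : ∀ d ∈ l, d ∈ dayOrder)
    (b0 b1 b2 b3 b4 b5 b6 : Bool) :
    l.foldl (fun (pr : List Bool) d => PySem.List.pySetD pr (idxA d) true)
        [b0, b1, b2, b3, b4, b5, b6]
      = [b0 || decide ("mon" ∈ l), b1 || decide ("tue" ∈ l), b2 || decide ("wed" ∈ l),
         b3 || decide ("thu" ∈ l), b4 || decide ("fri" ∈ l), b5 || decide ("sat" ∈ l),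
         b6 || decide ("sun" ∈ l)] := by
  induction l generalizing b0 b1 b2 b3 b4 b5 b6 with
  | nil => simp
  | cons d t ih =>
    have hd : d ∈ dayOrder := hl d (List.mem_cons_self ..)
    have ht : ∀ x ∈ t, x ∈ dayOrder := fun x hx => hl x (List.mem_cons_of_mem _ hx)
    simp only [dayOrder, List.mem_cons, List.not_mem_nil, or_false] at hd
    rcases hd with h | h | h | h | h | h | h <;> subst h <;> rw [List.foldl_cons]
    · exact (ih ht true b1 b2 b3 b4 b5 b6).trans (by simp)
    · exact (ih ht b0 true b2 b3 b4 b5 b6).trans (by simp)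
    · exact (ih ht b0 b1 true b3 b4 b5 b6).trans (by simp)
    · exact (ih ht b0 b1 b2 true b4 b5 b6).trans (by simp)
    · exact (ih ht b0 b1 b2 b3 true b5 b6).trans (by simp)
    · exact (ih ht b0 b1 b2 b3 b4 true b6).trans (by simp)
    · exact (ih ht b0 b1 b2 b3 b4 b5 true).trans (by simp)

-- A's sorted(set(xs), key=index) is DAY_ORDER filtered by membership
lemma sorted_eq_filter (day_blocks : List String) (hpre : ∀ d ∈ day_blocks, d ∈ dayOrder) :
    PySem.List.sorted (PySem.Set.ofList day_blocks) (fun d => idxA d) false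
      = dayOrder.filter (fun d => decide (d ∈ day_blocks)) := by
  apply PySem.List.sorted_eq_of_perm_of_pairwise_lt
  · apply (List.perm_ext_iff_of_nodup (List.Nodup.filter _ (by decide)) (PySem.Set.nodup_ofList _)).2
    intro x
    simp only [List.mem_filter, PySem.Set.mem_ofList, decide_eq_true_eq]
    exact ⟨fun h => h.2, fun h => ⟨hpre x h, h⟩⟩
  · apply List.Pairwise.filter
    decide

-- ===== VERDICT (by name: the statement is the Claim_ definition above) =====
theorem group_days_spec : Claim_equal_group_days := by
  intro day_blocks _ hpre
  unfold Spec_group_days group_days group_days_alt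
  by_cases hne : day_blocks = []
  · subst hne; rfl
  · rw [if_neg hne, sorted_eq_filter day_blocks hpre,
        filter_dayOrder (fun d => decide (d ∈ day_blocks)), core,
        maskFold (PySem.Set.ofList day_blocks)
          (fun d hd => hpre d ((PySem.Set.mem_ofList ..).1 hd))]
    simp [PySem.Set.mem_ofList]
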